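-- pv_equiv track=rewrite | github.com/GeorgiDN/python-fundamentals | lists_advanced_more_exercises/4_battle_ships.py | battle_ships
-- ===== SOURCE A (Python) =====
-- def increment_destroyed_ships(counter):
--     return counter + 1
--
-- def battle_ships(matrix, coord_for_attack, ships_destroyed):
--     for attacking_number in coord_for_attack:
--         row, column = int(attacking_number[0]), int(attacking_number[2])
--         if matrix[row][column] > 0:
--             matrix[row][column] -= 1
--             if matrix[row][column] == 0:
--                 ships_destroyed = increment_destroyed_ships(ships_destroyed)
--
--     return matrix, coord_for_attack, ships_destroyed
-- ===== SOURCE B (Python) =====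
-- def battle_ships(matrix, coord_for_attack, ships_destroyed):
--     counts = {}
--     for attacking_number in coord_for_attack:
--         key = (int(attacking_number[0]), int(attacking_number[2]))
--         counts[key] = counts.get(key, 0) + 1
--     for (row, column), hits in counts.items():
--         old = matrix[row][column]
--         if old > 0:
--             matrix[row][column] = max(old - hits, 0)
--             if hits >= old:
--                 ships_destroyed += 1
--     return matrix, coord_for_attack, ships_destroyed
-- ===== Notes on version B (the rewrite author's own statement) =====
-- stated objective: alternative
-- what changed: Replaces A's per-attack decrement loop (one read-modify-write of the cell for every attack) by a two-phase aggregate-then-apply strategy: one pass builds a dict counting attacks per (row,column) cell, a second pass touches each attacked cell once, setting it to max(old-hits,0) and counting it destroyed when hits >= old.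
import Mathlib
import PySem

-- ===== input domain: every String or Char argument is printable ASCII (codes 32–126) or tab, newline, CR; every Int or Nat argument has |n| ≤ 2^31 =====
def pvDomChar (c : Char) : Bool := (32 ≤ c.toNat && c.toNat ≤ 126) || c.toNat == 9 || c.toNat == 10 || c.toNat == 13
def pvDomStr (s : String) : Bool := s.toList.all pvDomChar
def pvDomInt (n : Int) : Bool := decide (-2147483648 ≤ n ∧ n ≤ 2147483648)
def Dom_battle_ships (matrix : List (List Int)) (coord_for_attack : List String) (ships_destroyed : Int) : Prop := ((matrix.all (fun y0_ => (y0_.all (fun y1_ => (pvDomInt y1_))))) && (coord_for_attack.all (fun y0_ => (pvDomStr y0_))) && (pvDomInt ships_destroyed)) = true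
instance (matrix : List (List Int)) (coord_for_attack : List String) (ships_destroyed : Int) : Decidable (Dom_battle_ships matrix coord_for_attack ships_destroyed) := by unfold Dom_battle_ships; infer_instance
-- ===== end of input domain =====

-- B replaces A's per-attack decrement loop by aggregate-then-apply: count attacks per cell in a
-- dict, then update each attacked cell once (alternative decomposition, no speed claim).
-- Python A mutates `matrix` in place; the equivalence proved here is about the RETURN value.

-- ===== PORT A =====

-- shared coordinate parsing: row, column = int(s[0]), int(s[2])  (both ports run the same code)
def pvParseCoord (s : String) : Option (Int × Int) :=
  match PySem.Str.pyGet? s 0, PySem.Str.pyGet? s 2 with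
  | some c0, some c2 =>
    (match PySem.Int.ofChars? [c0], PySem.Int.ofChars? [c2] with
     | some r, some c => some (r, c)
     | _, _ => none)
  | _, _ => none

def increment_destroyed_ships (counter : Int) : Int := counter + 1

-- one iteration of A's loop (pyGetD/pySetD are exact under Pre_, which puts every index in range)
def pvStepA (st : List (List Int) × Int) (s : String) : List (List Int) × Int :=
  match pvParseCoord s with
  | none => st
  | some (row, column) =>
    if 0 < PySem.List.pyGetD (PySem.List.pyGetD st.1 row []) column 0 then
      let m' := PySem.List.pySetD st.1 row
        (PySem.List.pySetD (PySem.List.pyGetD st.1 row []) column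
          (PySem.List.pyGetD (PySem.List.pyGetD st.1 row []) column 0 - 1))
      if PySem.List.pyGetD (PySem.List.pyGetD m' row []) column 0 = 0 then
        (m', increment_destroyed_ships st.2)
      else (m', st.2)
    else st

def battle_ships (matrix : List (List Int)) (coord_for_attack : List String) (ships_destroyed : Int) : List (List Int) × List String × Int :=
  let st := coord_for_attack.foldl pvStepA (matrix, ships_destroyed)
  (st.1, coord_for_attack, st.2)

-- ===== PORT B =====

-- second phase of B: apply the aggregated hit count of one cell
def pvApplyHits (st : List (List Int) × Int) (e : (Int × Int) × Int) : List (List Int) × Int :=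
  let old := PySem.List.pyGetD (PySem.List.pyGetD st.1 e.1.1 []) e.1.2 0
  if 0 < old then
    (PySem.List.pySetD st.1 e.1.1
       (PySem.List.pySetD (PySem.List.pyGetD st.1 e.1.1 []) e.1.2 (max (old - e.2) 0)),
     if old ≤ e.2 then st.2 + 1 else st.2)
  else st

def battle_ships_alt (matrix : List (List Int)) (coord_for_attack : List String) (ships_destroyed : Int) : List (List Int) × List String × Int :=
  let counts := coord_for_attack.foldl (fun d s =>
    match pvParseCoord s with
    | some k => d.insert k (d.getD k 0 + 1)
    | none => d) PySem.Dict.empty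
  let st := counts.items.foldl pvApplyHits (matrix, ships_destroyed)
  (st.1, coord_for_attack, st.2)

-- ===== PRECONDITION & SPEC =====

-- a parsed coordinate addresses a real cell of the matrix
def pvValid (m : List (List Int)) (k : Int × Int) : Bool :=
  decide (0 ≤ k.1) && decide (k.1 < (m.length : Int)) &&
  decide (0 ≤ k.2) && decide (k.2 < ((PySem.List.pyGetD m k.1 []).length : Int))

-- Pre_ excludes exactly the inputs where Python A raises: an attack string too short or whose
-- characters 0/2 are not digits (IndexError/ValueError), or coordinates outside the matrix (IndexError).
def Pre_battle_ships (matrix : List (List Int)) (coord_for_attack : List String) (ships_destroyed : Int) : Prop :=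
  ∀ s ∈ coord_for_attack, ((pvParseCoord s).elim false (pvValid matrix)) = true
instance (matrix : List (List Int)) (coord_for_attack : List String) (ships_destroyed : Int) : Decidable (Pre_battle_ships matrix coord_for_attack ships_destroyed) := by unfold Pre_battle_ships; infer_instance

def pvWitness_battle_ships : List (List Int) × List String × Int :=
  ([[2, 1], [0, 3]], ["0-0", "1x1", "0 0", "1x1"], 0)

def Spec_battle_ships (matrix : List (List Int)) (coord_for_attack : List String) (ships_destroyed : Int) (out : List (List Int) × List String × Int) : Prop := out = battle_ships_alt matrix coord_for_attack ships_destroyed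
instance (matrix : List (List Int)) (coord_for_attack : List String) (ships_destroyed : Int) (out : List (List Int) × List String × Int) : Decidable (Spec_battle_ships matrix coord_for_attack ships_destroyed out) := by unfold Spec_battle_ships; infer_instance

-- ===== CLAIM (what is proved, stated in full; the proofs are below) =====
def Claim_equal_battle_ships : Prop := ∀ (matrix : List (List Int)) (coord_for_attack : List String) (ships_destroyed : Int), Dom_battle_ships matrix coord_for_attack ships_destroyed → Pre_battle_ships matrix coord_for_attack ships_destroyed → Spec_battle_ships matrix coord_for_attack ships_destroyed (battle_ships matrix coord_for_attack ships_destroyed)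

-- ===== LEMMAS AND PROOFS =====

-- Nat-indexed model of one cell update (n aggregated hits on cell (r,c))
def pvHitN (st : List (List Int) × Int) (r c : Nat) (n : Int) : List (List Int) × Int :=
  if 0 < (st.1.getD r []).getD c 0 then
    (st.1.set r ((st.1.getD r []).set c (max ((st.1.getD r []).getD c 0 - n) 0)),
     if (st.1.getD r []).getD c 0 ≤ n then st.2 + 1 else st.2)
  else st

def pvBulk (st : List (List Int) × Int) (k : Int × Int) (n : Int) : List (List Int) × Int :=
  pvHitN st k.1.toNat k.2.toNat n

def pvValidN (m : List (List Int)) (r c : Nat) : Prop :=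
  r < m.length ∧ c < (m.getD r []).length

lemma getD_set_self' {A : Type} (l : List A) (i : Nat) (x d : A) (h : i < l.length) :
    (l.set i x).getD i d = x := by
  rw [List.getD_eq_getElem _ _ (by simpa using h)]
  exact List.getElem_set_self (by simpa using h)

lemma getD_set_ne' {A : Type} (l : List A) (i j : Nat) (x : A) (d : A) (h : i ≠ j) :
    (l.set i x).getD j d = l.getD j d := by
  simp [List.getD_eq_getElem?_getD, h]

def pvNewval (old n : Int) : Int := if 0 < old then max (old - n) 0 else old

def pvSdinc (old n : Int) : Int := if 0 < old then (if old ≤ n then 1 else 0) else 0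

-- under validity, one hit step is a plain set of the cell plus an additive bump of the counter
lemma hitN_valid_eq (st : List (List Int) × Int) (r c : Nat) (n : Int)
    (hr : r < st.1.length) (hc : c < (st.1.getD r []).length) :
    pvHitN st r c n
      = (st.1.set r ((st.1.getD r []).set c (pvNewval ((st.1.getD r []).getD c 0) n)),
         st.2 + pvSdinc ((st.1.getD r []).getD c 0) n) := by
  unfold pvHitN pvNewval pvSdinc
  split_ifs with h h2
  · rfl
  · rw [add_zero]
  · have h1 : (st.1.getD r []).set c ((st.1.getD r []).getD c 0) = st.1.getD r [] := by
      rw [List.getD_eq_getElem _ 0 hc]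
      exact List.set_getElem_self hc
    rw [h1, List.getD_eq_getElem _ [] hr, List.set_getElem_self hr, add_zero]

lemma pvValid_iff (m : List (List Int)) (k : Int × Int) :
    pvValid m k = true ↔ 0 ≤ k.1 ∧ 0 ≤ k.2 ∧ pvValidN m k.1.toNat k.2.toNat := by
  unfold pvValid pvValidN
  by_cases h1 : 0 ≤ k.1
  · by_cases h2 : k.1 < (m.length : Int)
    · rw [PySem.List.pyGetD_eq_getElem m [] h1 h2,
        ← List.getD_eq_getElem m [] (by omega : k.1.toNat < m.length)]
      simp
      omega
    · simp
      omega
  · simp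
    omega

lemma pvApplyHits_eq_bulk (st : List (List Int) × Int) (k : Int × Int) (n : Int)
    (h : pvValid st.1 k = true) : pvApplyHits st (k, n) = pvBulk st k n := by
  obtain ⟨k1, k2⟩ := k
  rcases (pvValid_iff st.1 (k1, k2)).mp h with ⟨h1, h2, hr, hc⟩
  dsimp only at h1 h2 hr hc
  have hi : k1 < (st.1.length : Int) := by omega
  have hrow : PySem.List.pyGetD st.1 k1 [] = st.1.getD k1.toNat [] := by
    rw [PySem.List.pyGetD_eq_getElem st.1 [] h1 hi, List.getD_eq_getElem st.1 [] hr]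
  have hj : k2 < ((st.1.getD k1.toNat []).length : Int) := by omega
  unfold pvApplyHits pvBulk pvHitN
  dsimp only
  rw [hrow, PySem.List.pyGetD_eq_getElem _ 0 h2 hj, ← List.getD_eq_getElem _ 0 hc]
  rw [PySem.List.pySetD_of_nonneg _ _ h2, PySem.List.pySetD_of_nonneg _ _ h1]

lemma pvStepA_eq_bulk (st : List (List Int) × Int) (s : String) (k : Int × Int)
    (hp : pvParseCoord s = some k) (h : pvValid st.1 k = true) :
    pvStepA st s = pvBulk st k 1 := by
  obtain ⟨k1, k2⟩ := k
  rcases (pvValid_iff st.1 (k1, k2)).mp h with ⟨h1, h2, hr, hc⟩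
  dsimp only at h1 h2 hr hc
  have hi : k1 < (st.1.length : Int) := by omega
  have hrow : PySem.List.pyGetD st.1 k1 [] = st.1.getD k1.toNat [] := by
    rw [PySem.List.pyGetD_eq_getElem st.1 [] h1 hi, List.getD_eq_getElem st.1 [] hr]
  have hj : k2 < ((st.1.getD k1.toNat []).length : Int) := by omega
  unfold pvStepA pvBulk pvHitN increment_destroyed_ships
  rw [hp]
  dsimp only
  rw [hrow, PySem.List.pyGetD_eq_getElem _ 0 h2 hj, ← List.getD_eq_getElem _ 0 hc]
  rw [PySem.List.pySetD_of_nonneg _ _ h2, PySem.List.pySetD_of_nonneg _ _ h1]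
  have hm'row : PySem.List.pyGetD
      (st.1.set k1.toNat ((st.1.getD k1.toNat []).set k2.toNat ((st.1.getD k1.toNat []).getD k2.toNat 0 - 1)))
      k1 [] = (st.1.getD k1.toNat []).set k2.toNat ((st.1.getD k1.toNat []).getD k2.toNat 0 - 1) := by
    rw [PySem.List.pyGetD_eq_getElem _ [] h1 (by simpa using hi)]
    exact List.getElem_set_self (by simpa using hr)
  rw [hm'row]
  rw [PySem.List.pyGetD_eq_getElem _ 0 h2 (by simpa using hj)]
  rw [List.getElem_set_self (by simpa using hc)]
  set old := (st.1.getD k1.toNat []).getD k2.toNat 0 with hold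
  split_ifs <;> first | rfl | omega | (rw [show max (old - 1) 0 = old - 1 by omega])

lemma hitN_fst (st : List (List Int) × Int) (r c : Nat) (n : Int) :
    (pvHitN st r c n).1 = (if 0 < (st.1.getD r []).getD c 0 then
      st.1.set r ((st.1.getD r []).set c (max ((st.1.getD r []).getD c 0 - n) 0)) else st.1) := by
  unfold pvHitN
  split_ifs <;> rfl

lemma length_hitN (st : List (List Int) × Int) (r c : Nat) (n : Int) :
    (pvHitN st r c n).1.length = st.1.length := by
  rw [hitN_fst]
  split_ifs <;> simp

lemma rowlen_hitN (st : List (List Int) × Int) (r c : Nat) (n : Int) (j : Nat) :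
    ((pvHitN st r c n).1.getD j []).length = (st.1.getD j []).length := by
  rw [hitN_fst]
  split_ifs with h
  · simp only [List.getD_eq_getElem?_getD, List.getElem?_set]
    split_ifs with h1 h2
    · subst h1
      simp [List.getElem?_eq_getElem h2]
    · subst h1
      rw [List.getElem?_eq_none (by omega)]
    · rfl
  · rfl

lemma pvValid_bulk (st : List (List Int) × Int) (k : Int × Int) (n : Int) (k' : Int × Int) :
    pvValid (pvBulk st k n).1 k' = pvValid st.1 k' := by
  have pyrow : ∀ (i : Int), (PySem.List.pyGetD (pvBulk st k n).1 i []).length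
      = (PySem.List.pyGetD st.1 i []).length := by
    intro i
    unfold pvBulk PySem.List.pyGetD PySem.List.pyGet?
    rw [length_hitN]
    cases hidx : PySem.List.pyIdx? st.1.length i with
    | none => rfl
    | some j =>
      dsimp only [Option.bind]
      rw [← List.getD_eq_getElem?_getD, ← List.getD_eq_getElem?_getD, rowlen_hitN]
  unfold pvValid
  rw [pyrow]
  have hlen : (pvBulk st k n).1.length = st.1.length := length_hitN st _ _ n
  rw [hlen]

lemma hitN_hitN_same (st : List (List Int) × Int) (r c : Nat) (a b : Int)
    (hv : pvValidN st.1 r c) (hb : 0 ≤ b) :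
    pvHitN (pvHitN st r c a) r c b = pvHitN st r c (a + b) := by
  obtain ⟨hr, hc⟩ := hv
  have hr1 : r < (pvHitN st r c a).1.length := by rw [length_hitN]; exact hr
  have hc1 : c < ((pvHitN st r c a).1.getD r []).length := by rw [rowlen_hitN]; exact hc
  rw [hitN_valid_eq st r c a hr hc] at hr1 hc1 ⊢
  rw [hitN_valid_eq _ r c b hr1 hc1, hitN_valid_eq st r c (a + b) hr hc]
  have hrow : ((st.1.set r ((st.1.getD r []).set c (pvNewval ((st.1.getD r []).getD c 0) a)),
      st.2 + pvSdinc ((st.1.getD r []).getD c 0) a).1.getD r [])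
      = (st.1.getD r []).set c (pvNewval ((st.1.getD r []).getD c 0) a) :=
    getD_set_self' _ r _ [] hr
  rw [hrow]
  rw [getD_set_self' _ c _ 0 hc]
  rw [List.set_set, List.set_set]
  have h1 : pvNewval (pvNewval ((st.1.getD r []).getD c 0) a) b
      = pvNewval ((st.1.getD r []).getD c 0) (a + b) := by
    unfold pvNewval
    split_ifs <;> omega
  have h2 : pvSdinc ((st.1.getD r []).getD c 0) a + pvSdinc (pvNewval ((st.1.getD r []).getD c 0) a) b
      = pvSdinc ((st.1.getD r []).getD c 0) (a + b) := by
    unfold pvSdinc pvNewval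
    split_ifs <;> omega
  rw [h1, add_assoc, h2]

lemma hitN_comm (st : List (List Int) × Int) (r c r' c' : Nat) (a b : Int)
    (hne : ¬(r = r' ∧ c = c')) (hv : pvValidN st.1 r c) (hv' : pvValidN st.1 r' c') :
    pvHitN (pvHitN st r c a) r' c' b = pvHitN (pvHitN st r' c' b) r c a := by
  obtain ⟨hr, hc⟩ := hv
  obtain ⟨hr', hc'⟩ := hv'
  have hr1 : r' < (pvHitN st r c a).1.length := by rw [length_hitN]; exact hr'
  have hc1 : c' < ((pvHitN st r c a).1.getD r' []).length := by rw [rowlen_hitN]; exact hc'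
  have hr2 : r < (pvHitN st r' c' b).1.length := by rw [length_hitN]; exact hr
  have hc2 : c < ((pvHitN st r' c' b).1.getD r []).length := by rw [rowlen_hitN]; exact hc
  rw [hitN_valid_eq st r c a hr hc] at hr1 hc1 ⊢
  rw [hitN_valid_eq st r' c' b hr' hc'] at hr2 hc2 ⊢
  rw [hitN_valid_eq _ r' c' b hr1 hc1, hitN_valid_eq _ r c a hr2 hc2]
  by_cases hrr : r = r'
  · subst hrr
    have hcc : c ≠ c' := by
      intro hcontra
      exact hne ⟨rfl, hcontra⟩
    rw [getD_set_self' _ r _ [] hr, getD_set_self' _ r _ [] hr]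
    rw [getD_set_ne' _ c c' _ 0 hcc, getD_set_ne' _ c' c _ 0 hcc.symm]
    rw [List.set_set, List.set_set]
    rw [List.set_comm _ _ hcc]
    refine Prod.ext_iff.mpr ⟨rfl, ?_⟩
    dsimp only
    ring
  · rw [getD_set_ne' _ r r' _ [] hrr, getD_set_ne' _ r' r _ [] (Ne.symm hrr)]
    rw [List.set_comm _ _ hrr]
    refine Prod.ext_iff.mpr ⟨rfl, ?_⟩
    dsimp only
    ring

lemma bulk_comm (st : List (List Int) × Int) (k k' : Int × Int) (a b : Int)
    (hne : k ≠ k') (hv : pvValid st.1 k = true) (hv' : pvValid st.1 k' = true) :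
    pvBulk (pvBulk st k a) k' b = pvBulk (pvBulk st k' b) k a := by
  rcases (pvValid_iff st.1 k).mp hv with ⟨h1, h2, hN⟩
  rcases (pvValid_iff st.1 k').mp hv' with ⟨h1', h2', hN'⟩
  have hne' : ¬(k.1.toNat = k'.1.toNat ∧ k.2.toNat = k'.2.toNat) := by
    rintro ⟨e1, e2⟩
    apply hne
    refine Prod.ext_iff.mpr ⟨?_, ?_⟩ <;> omega
  exact hitN_comm st _ _ _ _ a b hne' hN hN' 

lemma bulk_bulk_same (st : List (List Int) × Int) (k : Int × Int) (a b : Int)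
    (hv : pvValid st.1 k = true) (hb : 0 ≤ b) :
    pvBulk (pvBulk st k a) k b = pvBulk st k (a + b) := by
  rcases (pvValid_iff st.1 k).mp hv with ⟨h1, h2, hN⟩
  exact hitN_hitN_same st _ _ a b hN hb

lemma pvValid_foldl (es : List ((Int × Int) × Int)) (st : List (List Int) × Int) (k' : Int × Int) :
    pvValid (es.foldl (fun st e => pvBulk st e.1 e.2) st).1 k' = pvValid st.1 k' := by
  induction es generalizing st with
  | nil => rfl
  | cons e tl ih => rw [List.foldl_cons, ih, pvValid_bulk]

-- pull one bulk update through a fold over entries with other keys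
lemma foldl_bulk_comm (es : List ((Int × Int) × Int)) (st : List (List Int) × Int)
    (k : Int × Int) (n : Int)
    (hes : ∀ e ∈ es, e.1 ≠ k ∧ pvValid st.1 e.1 = true) (hk : pvValid st.1 k = true) :
    es.foldl (fun st e => pvBulk st e.1 e.2) (pvBulk st k n)
      = pvBulk (es.foldl (fun st e => pvBulk st e.1 e.2) st) k n := by
  induction es generalizing st with
  | nil => rfl
  | cons e tl ih =>
    simp only [List.foldl_cons]
    have he := hes e (List.mem_cons_self ..)
    rw [bulk_comm st k e.1 n e.2 (Ne.symm he.1) hk he.2]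
    exact ih (pvBulk st e.1 e.2)
      (fun e' h' => ⟨(hes e' (List.mem_cons_of_mem _ h')).1,
        by rw [pvValid_bulk]; exact (hes e' (List.mem_cons_of_mem _ h')).2⟩)
      (by rw [pvValid_bulk]; exact hk)

-- the main lemma: per-attack hits equal aggregated per-cell hits
lemma foldl_hits_eq_grouped (keys : List (Int × Int)) (st : List (List Int) × Int)
    (hv : ∀ k ∈ keys, pvValid st.1 k = true) :
    keys.foldl (fun st k => pvBulk st k 1) st
      = ((PySem.Set.ofList keys).map (fun k => (k, (keys.count k : Int)))).foldl
          (fun st e => pvBulk st e.1 e.2) st := by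
  induction keys generalizing st with
  | nil => rfl
  | cons k rest ih =>
    have hvk : pvValid st.1 k = true := hv k (List.mem_cons_self ..)
    have hvrest : ∀ k' ∈ rest, pvValid st.1 k' = true :=
      fun k' h' => hv k' (List.mem_cons_of_mem _ h')
    rw [List.foldl_cons,
      ih (pvBulk st k 1) (fun k' h' => by rw [pvValid_bulk]; exact hvrest k' h'),
      PySem.Set.ofList_cons]
    simp only [List.map_cons, List.foldl_cons, List.count_cons_self]
    have hmap : ((PySem.Set.ofList rest).discard k).map
          (fun x => (x, ((k :: rest).count x : Int)))
        = ((PySem.Set.ofList rest).discard k).map (fun x => (x, (rest.count x : Int))) := by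
      apply List.map_congr_left
      intro x hx
      have hxk : x ≠ k := ((PySem.Set.mem_discard _ _ _).mp hx).2
      rw [List.count_cons_of_ne (Ne.symm hxk)]
    rw [hmap]
    by_cases hk : k ∈ rest
    · obtain ⟨pre, post, hsplit⟩ := List.append_of_mem ((PySem.Set.mem_ofList rest k).mpr hk)
      have hnd := PySem.Set.nodup_ofList rest (α := Int × Int)
      rw [hsplit] at hnd
      rcases List.nodup_append.mp hnd with ⟨hnd1, hnd2, hdisj⟩
      have hkpre : k ∉ pre := fun hm => (hdisj k hm k (List.mem_cons_self ..)) rfl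
      have hkpost : k ∉ post := (List.nodup_cons.mp hnd2).1
      have hdisc : (PySem.Set.ofList rest).discard k = pre ++ post := by
        rw [hsplit]
        simp only [PySem.Set.discard, List.filter_append, List.filter_cons]
        rw [List.filter_eq_self.mpr (fun a ha => by
              simpa using (show a ≠ k from fun e => hkpre (e ▸ ha))),
            List.filter_eq_self.mpr (fun a ha => by
              simpa using (show a ≠ k from fun e => hkpost (e ▸ ha)))]
        simp
      rw [hdisc, hsplit]
      simp only [List.map_append, List.foldl_append, List.map_cons, List.foldl_cons]
      have hpreval : ∀ e ∈ pre.map (fun x => (x, (rest.count x : Int))),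
          e.1 ≠ k ∧ pvValid st.1 e.1 = true := by
        intro e he
        obtain ⟨x, hx, rfl⟩ := List.mem_map.mp he
        refine ⟨fun e' => hkpre (e' ▸ hx), ?_⟩
        have : x ∈ rest := (PySem.Set.mem_ofList rest x).mp (hsplit ▸ List.mem_append_left _ hx)
        exact hvrest x this
      rw [foldl_bulk_comm _ st k 1 hpreval hvk,
        foldl_bulk_comm _ st k ((rest.count k + 1 : Nat) : Int) hpreval hvk]
      congr 1
      have hvP : pvValid ((pre.map (fun x => (x, (rest.count x : Int)))).foldl
          (fun st e => pvBulk st e.1 e.2) st).1 k = true := by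
        rw [pvValid_foldl]
        exact hvk
      rw [bulk_bulk_same _ k 1 ((rest.count k : Nat) : Int) hvP (Int.natCast_nonneg _)]
      congr 1
      push_cast
      ring
    · have hd : (PySem.Set.ofList rest).discard k = PySem.Set.ofList rest := by
        refine List.filter_eq_self.mpr (fun a ha => ?_)
        have : a ≠ k := fun e => hk (e ▸ ((PySem.Set.mem_ofList rest a).mp ha))
        simp [this]
      have hc0 : rest.count k = 0 := by
        simp [List.count_eq_zero, hk]
      rw [hd, hc0]
      norm_num

-- A's fold over attacks is the fold of single hits over the parsed keys
lemma foldlA_eq (coord : List String) (st : List (List Int) × Int)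
    (h : ∀ s ∈ coord, ((pvParseCoord s).elim false (pvValid st.1)) = true) :
    coord.foldl pvStepA st
      = (coord.filterMap pvParseCoord).foldl (fun st k => pvBulk st k 1) st := by
  induction coord generalizing st with
  | nil => rfl
  | cons s tl ih =>
    have hs := h s (List.mem_cons_self ..)
    cases hp : pvParseCoord s with
    | none =>
      have hstep : pvStepA st s = st := by unfold pvStepA; rw [hp]
      simp only [List.foldl_cons, List.filterMap_cons, hp, hstep]
      exact ih st (fun s' h' => h s' (List.mem_cons_of_mem _ h'))
    | some k =>
      have hvk : pvValid st.1 k = true := by rw [hp] at hs; simpa using hs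
      simp only [List.foldl_cons, List.filterMap_cons, hp]
      rw [pvStepA_eq_bulk st s k hp hvk]
      refine ih (pvBulk st k 1) (fun s' h' => ?_)
      have h'' := h s' (List.mem_cons_of_mem _ h')
      cases hp' : pvParseCoord s' with
      | none => rw [hp'] at h''; simpa using h''
      | some k' =>
        rw [hp'] at h''
        simpa [pvValid_bulk] using h''

-- B's second fold over dict items is the fold of pvBulk over the same entries
lemma foldlB_eq (es : List ((Int × Int) × Int)) (st : List (List Int) × Int)
    (h : ∀ e ∈ es, pvValid st.1 e.1 = true) :
    es.foldl pvApplyHits st = es.foldl (fun st e => pvBulk st e.1 e.2) st := by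
  induction es generalizing st with
  | nil => rfl
  | cons e tl ih =>
    obtain ⟨ek, en⟩ := e
    simp only [List.foldl_cons]
    rw [pvApplyHits_eq_bulk st ek en (h (ek, en) (List.mem_cons_self ..))]
    exact ih (pvBulk st ek en)
      (fun e' h' => by rw [pvValid_bulk]; exact h e' (List.mem_cons_of_mem _ h'))

-- B's counting dict is the counter of the parsed keys
lemma counts_eq_counter (coord : List String) :
    coord.foldl (fun d s =>
      match pvParseCoord s with
      | some k => d.insert k (d.getD k 0 + 1)
      | none => d) (PySem.Dict.empty : PySem.Dict (Int × Int) Int)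
      = PySem.Dict.counter (coord.filterMap pvParseCoord) := by
  have aux : ∀ (cs : List String) (d : PySem.Dict (Int × Int) Int),
      cs.foldl (fun d s =>
        match pvParseCoord s with
        | some k => d.insert k (d.getD k 0 + 1)
        | none => d) d
      = (cs.filterMap pvParseCoord).foldl (fun d k => d.insert k (d.getD k 0 + 1)) d := by
    intro cs
    induction cs with
    | nil => intro d; rfl
    | cons s tl ih =>
      intro d
      cases hp : pvParseCoord s <;>
        simp only [List.foldl_cons, List.filterMap_cons, hp] <;>
        exact ih _
  rw [aux, PySem.Dict.foldl_insert_getD_add_one_eq_counter]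

-- ===== VERDICT (by name: the statement is the Claim_ definition above) =====
theorem battle_ships_spec : Claim_equal_battle_ships := by
  intro matrix coord sd hdom hpre
  unfold Spec_battle_ships battle_ships battle_ships_alt
  dsimp only
  have hkeysvalid : ∀ k ∈ coord.filterMap pvParseCoord, pvValid matrix k = true := by
    intro k hk
    obtain ⟨s, hs, hps⟩ := List.mem_filterMap.mp hk
    have h' := hpre s hs
    rw [hps] at h'
    simpa using h'
  rw [foldlA_eq coord (matrix, sd) hpre,
    counts_eq_counter coord, PySem.Dict.items_counter,
    foldlB_eq _ (matrix, sd) (fun e he => by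
      obtain ⟨x, hx, rfl⟩ := List.mem_map.mp he
      exact hkeysvalid x ((PySem.Set.mem_ofList _ _).mp hx)),
    foldl_hits_eq_grouped _ (matrix, sd) hkeysvalid]
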